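-- pv_equiv track=rewrite | github.com/Crimson-Amir/NoonYar-Server-Side | application/algorithm.py | compute_empty_slot_time
-- ===== SOURCE A (Python) =====
-- def compute_empty_slot_time(keys, index, reservation_dict):
--     consecutive_empty, consecutive_full = 0, 0
--
--     prev_sum = sum(reservation_dict[keys[0]]) if keys else 0
--
--     for i in range(1, len(keys)):
--         curr_sum = sum(reservation_dict[keys[i]])
--
--         if prev_sum == 1 and curr_sum == 1:
--             if keys[i] <= index:
--                 consecutive_empty += 1
--         else:
--             consecutive_empty = 0
--
--         if prev_sum > 1 and curr_sum > 1:
--             if keys[i] <= index: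
--                 consecutive_full += 1
--
--         prev_sum = curr_sum
--
--     return consecutive_empty + consecutive_full
-- ===== SOURCE B (Python) =====
-- def compute_empty_slot_time(keys, index, reservation_dict):
--     n = len(keys)
--     if n <= 1:
--         return 0
--     sums = [sum(reservation_dict[k]) for k in keys]
--     full = 0
--     for i in range(1, n):
--         if sums[i - 1] > 1 and sums[i] > 1 and keys[i] <= index:
--             full += 1
--     empty = 0
--     i = n - 1
--     while i > 0 and sums[i - 1] == 1 and sums[i] == 1:
--         if keys[i] <= index:
--             empty += 1
--         i -= 1
--     return empty + full
-- ===== Notes on version B (the rewrite author's own statement) =====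
-- stated objective: alternative
-- what changed: Instead of one forward pass threading a reset-on-mismatch counter through the fold state, B precomputes the per-key sums once, counts the 'full' pairs with a simple forward count, and computes the trailing 'empty' run with a backward while loop that stops at the first non-(1,1) pair.
import Mathlib
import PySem

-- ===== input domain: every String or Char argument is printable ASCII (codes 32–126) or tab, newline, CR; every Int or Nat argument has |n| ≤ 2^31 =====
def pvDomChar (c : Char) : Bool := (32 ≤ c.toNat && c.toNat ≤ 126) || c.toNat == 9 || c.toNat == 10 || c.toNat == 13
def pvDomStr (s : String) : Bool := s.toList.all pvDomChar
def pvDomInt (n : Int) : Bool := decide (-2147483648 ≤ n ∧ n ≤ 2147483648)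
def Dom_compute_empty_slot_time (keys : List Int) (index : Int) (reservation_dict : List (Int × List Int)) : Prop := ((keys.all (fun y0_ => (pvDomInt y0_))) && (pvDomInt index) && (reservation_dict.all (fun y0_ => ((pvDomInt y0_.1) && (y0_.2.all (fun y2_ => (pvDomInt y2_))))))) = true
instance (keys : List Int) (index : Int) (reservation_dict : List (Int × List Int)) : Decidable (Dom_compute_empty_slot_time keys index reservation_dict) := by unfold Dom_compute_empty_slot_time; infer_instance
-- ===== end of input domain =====

-- B replaces A's single stateful forward pass (a reset-on-mismatch counter threaded through the
-- loop) by a precomputed sums list, a plain forward count of the 'full' pairs, and a backward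
-- while loop for the trailing 'empty' run; same cost (objective: alternative).

-- ===== PORT A =====
-- sum(reservation_dict[k]); the dict lookup is total via getD, exact under Pre_ (missing key = KeyError)
def pvLookupSum (reservation_dict : List (Int × List Int)) (k : Int) : Int :=
  ((PySem.Dict.ofList reservation_dict).getD k []).sum

-- A's loop body (one iteration of the for-loop, state = (consecutive_empty, consecutive_full, prev_sum))
def pvStepA (keys : List Int) (index : Int) (reservation_dict : List (Int × List Int))
    (st : Int × Int × Int) (i : Int) : Int × Int × Int :=
  let curr := pvLookupSum reservation_dict (PySem.List.pyGetD keys i 0)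
  ( if st.2.2 = 1 ∧ curr = 1 then (if PySem.List.pyGetD keys i 0 ≤ index then st.1 + 1 else st.1) else 0,
    if 1 < st.2.2 ∧ 1 < curr ∧ PySem.List.pyGetD keys i 0 ≤ index then st.2.1 + 1 else st.2.1,
    curr )

def compute_empty_slot_time (keys : List Int) (index : Int) (reservation_dict : List (Int × List Int)) : Int :=
  let prev_sum : Int := if keys.isEmpty then 0 else pvLookupSum reservation_dict (PySem.List.pyGetD keys 0 0)
  let st := (PySem.List.pyRange 1 (keys.length : Int) 1).foldl (pvStepA keys index reservation_dict) (0, 0, prev_sum)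
  st.1 + st.2.1

-- ===== PORT B =====
-- B's backward while loop: i counts down from n-1; break at the first non-(1,1) pair
def pvEmptyWhile (sums : List Int) (keys : List Int) (index : Int) : Nat → Int
  | 0 => 0
  | i + 1 =>
    if sums.getD i 0 = 1 ∧ sums.getD (i + 1) 0 = 1 then
      (if keys.getD (i + 1) 0 ≤ index then 1 else 0) + pvEmptyWhile sums keys index i
    else 0

def compute_empty_slot_time_alt (keys : List Int) (index : Int) (reservation_dict : List (Int × List Int)) : Int :=
  if keys.length ≤ 1 then 0
  else
    let sums := keys.map (fun k => pvLookupSum reservation_dict k)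
    let full := (PySem.List.pyRange 1 (keys.length : Int) 1).foldl
      (fun f i =>
        if 1 < PySem.List.pyGetD sums (i - 1) 0 ∧ 1 < PySem.List.pyGetD sums i 0 ∧
            PySem.List.pyGetD keys i 0 ≤ index then f + 1 else f) 0
    pvEmptyWhile sums keys index (keys.length - 1) + full

-- ===== PRECONDITION & SPEC =====
-- Pre_ excludes exactly the inputs where Python A raises KeyError: some key in keys is absent
-- from reservation_dict (all list indices A uses are in range by construction).
def Pre_compute_empty_slot_time (keys : List Int) (index : Int) (reservation_dict : List (Int × List Int)) : Prop :=
  ∀ k ∈ keys, (PySem.Dict.ofList reservation_dict).contains k = true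
instance (keys : List Int) (index : Int) (reservation_dict : List (Int × List Int)) : Decidable (Pre_compute_empty_slot_time keys index reservation_dict) := by unfold Pre_compute_empty_slot_time; infer_instance
def pvWitness_compute_empty_slot_time : List Int × Int × (List (Int × List Int)) :=
  ([1, 2, 3], 2, [(1, [1]), (2, [1]), (3, [2])])

def Spec_compute_empty_slot_time (keys : List Int) (index : Int) (reservation_dict : List (Int × List Int)) (out : Int) : Prop := out = compute_empty_slot_time_alt keys index reservation_dict
instance (keys : List Int) (index : Int) (reservation_dict : List (Int × List Int)) (out : Int) : Decidable (Spec_compute_empty_slot_time keys index reservation_dict out) := by unfold Spec_compute_empty_slot_time; infer_instance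

-- ===== CLAIM (what is proved, stated in full; the proofs are below) =====
def Claim_equal_compute_empty_slot_time : Prop := ∀ (keys : List Int) (index : Int) (reservation_dict : List (Int × List Int)), Dom_compute_empty_slot_time keys index reservation_dict → Pre_compute_empty_slot_time keys index reservation_dict → Spec_compute_empty_slot_time keys index reservation_dict (compute_empty_slot_time keys index reservation_dict)

-- ===== LEMMAS AND PROOFS =====

-- the 'consecutive_empty' value after processing indices 1..m (A's semantics, via the sums list)
def pvE (keys sums : List Int) (index : Int) : Nat → Int
  | 0 => 0
  | m + 1 => if sums.getD m 0 = 1 ∧ sums.getD (m + 1) 0 = 1 then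
               (if keys.getD (m + 1) 0 ≤ index then pvE keys sums index m + 1 else pvE keys sums index m)
             else 0

-- the 'consecutive_full' value after processing indices 1..m
def pvF (keys sums : List Int) (index : Int) : Nat → Int
  | 0 => 0
  | m + 1 => if 1 < sums.getD m 0 ∧ 1 < sums.getD (m + 1) 0 ∧ keys.getD (m + 1) 0 ≤ index then
               pvF keys sums index m + 1
             else pvF keys sums index m

theorem pvGetD_map_lookup (reservation_dict : List (Int × List Int)) (keys : List Int) (j : Nat)
    (h : j < keys.length) :
    (keys.map (fun k => pvLookupSum reservation_dict k)).getD j 0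
      = pvLookupSum reservation_dict (keys.getD j 0) := by
  simp [List.getD, List.getElem?_map, List.getElem?_eq_getElem h]

theorem pvFoldA (keys : List Int) (index : Int) (reservation_dict : List (Int × List Int))
    (m : Nat) (h : m < keys.length) :
    (PySem.List.pyRange 1 ((m : Int) + 1) 1).foldl (pvStepA keys index reservation_dict)
        (0, 0, (keys.map (fun k => pvLookupSum reservation_dict k)).getD 0 0)
      = (pvE keys (keys.map (fun k => pvLookupSum reservation_dict k)) index m,
         pvF keys (keys.map (fun k => pvLookupSum reservation_dict k)) index m,
         (keys.map (fun k => pvLookupSum reservation_dict k)).getD m 0) := by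
  induction m with
  | zero => simp [PySem.List.pyRange_one_eq_nil, pvE, pvF]
  | succ m ih =>
    have hm : m < keys.length := Nat.lt_of_succ_lt h
    have hsplit : PySem.List.pyRange 1 ((m + 1 : Nat) : Int) 1 ++ [((m + 1 : Nat) : Int)]
        = PySem.List.pyRange 1 (((m + 1 : Nat) : Int) + 1) 1 :=
      (PySem.List.pyRange_one_succ_right (by push_cast; omega)).symm
    push_cast at hsplit ⊢
    rw [← hsplit, List.foldl_append, ih hm]
    have hkey : PySem.List.pyGetD keys ((m : Int) + 1) 0 = keys.getD (m + 1) 0 := by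
      have := PySem.List.pyGetD_natCast keys (m + 1) 0
      push_cast at this; exact this
    simp only [List.foldl_cons, List.foldl_nil, pvStepA, pvE, pvF, hkey]
    rw [pvGetD_map_lookup reservation_dict keys (m + 1) h]

theorem pvFoldBfull (keys sums : List Int) (index : Int) (m : Nat) :
    (PySem.List.pyRange 1 ((m : Int) + 1) 1).foldl
      (fun f i =>
        if 1 < PySem.List.pyGetD sums (i - 1) 0 ∧ 1 < PySem.List.pyGetD sums i 0 ∧
            PySem.List.pyGetD keys i 0 ≤ index then f + 1 else f) 0
      = pvF keys sums index m := by
  induction m with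
  | zero => simp [PySem.List.pyRange_one_eq_nil, pvF]
  | succ m ih =>
    have hsplit : PySem.List.pyRange 1 ((m + 1 : Nat) : Int) 1 ++ [((m + 1 : Nat) : Int)]
        = PySem.List.pyRange 1 (((m + 1 : Nat) : Int) + 1) 1 :=
      (PySem.List.pyRange_one_succ_right (by push_cast; omega)).symm
    push_cast at hsplit ⊢
    rw [← hsplit, List.foldl_append, ih]
    have h1 : PySem.List.pyGetD sums ((m : Int) + 1 - 1) 0 = sums.getD m 0 := by
      have := PySem.List.pyGetD_natCast sums m 0
      simpa using this
    have h2 : PySem.List.pyGetD sums ((m : Int) + 1) 0 = sums.getD (m + 1) 0 := by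
      have := PySem.List.pyGetD_natCast sums (m + 1) 0
      push_cast at this; exact this
    have h3 : PySem.List.pyGetD keys ((m : Int) + 1) 0 = keys.getD (m + 1) 0 := by
      have := PySem.List.pyGetD_natCast keys (m + 1) 0
      push_cast at this; exact this
    simp only [List.foldl_cons, List.foldl_nil, pvF, h1, h2, h3]

theorem pvEmptyWhile_eq_pvE (sums keys : List Int) (index : Int) (m : Nat) :
    pvEmptyWhile sums keys index m = pvE keys sums index m := by
  induction m with
  | zero => rfl
  | succ m ih =>
    simp only [pvEmptyWhile, pvE, ih]
    split_ifs <;> omega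

theorem pv_main (keys : List Int) (index : Int) (reservation_dict : List (Int × List Int)) :
    compute_empty_slot_time keys index reservation_dict
      = compute_empty_slot_time_alt keys index reservation_dict := by
  by_cases hn : keys.length ≤ 1
  · unfold compute_empty_slot_time compute_empty_slot_time_alt
    have : PySem.List.pyRange 1 (keys.length : Int) 1 = [] :=
      PySem.List.pyRange_one_eq_nil (by omega)
    simp [this, hn]
  · have hlen : 1 < keys.length := by omega
    have hne : ¬ keys.isEmpty := by
      cases keys with
      | nil => simp at hlen
      | cons a l => simp
    have hm : keys.length - 1 < keys.length := by omega
    have hcast : ((keys.length - 1 : Nat) : Int) + 1 = (keys.length : Int) := by omega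
    have hprev : pvLookupSum reservation_dict (PySem.List.pyGetD keys 0 0)
        = (keys.map (fun k => pvLookupSum reservation_dict k)).getD 0 0 := by
      have h0 : PySem.List.pyGetD keys ((0 : Nat) : Int) 0 = keys.getD 0 0 :=
        PySem.List.pyGetD_natCast keys 0 0
      simp only [Nat.cast_zero] at h0
      rw [h0, pvGetD_map_lookup _ _ _ (by omega)]
    unfold compute_empty_slot_time compute_empty_slot_time_alt
    simp only [hne, if_false, Bool.false_eq_true, hn]
    rw [hprev, ← hcast, pvFoldA keys index reservation_dict _ hm,
        pvFoldBfull keys (keys.map (fun k => pvLookupSum reservation_dict k)) index (keys.length - 1),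
        pvEmptyWhile_eq_pvE]

-- ===== VERDICT (by name: the statement is the Claim_ definition above) =====
theorem compute_empty_slot_time_spec : Claim_equal_compute_empty_slot_time := by
  intro keys index reservation_dict _ _
  unfold Spec_compute_empty_slot_time
  exact pv_main keys index reservation_dict
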